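-- pv_equiv track=rewrite | github.com/PriyankaSingla013/competitiveprogramming | 2632-apply-bitwise-operations-to-make-strings-equal/apply-bitwise-operations-to-make-strings-equal.py | makeStringsEqual
-- ===== SOURCE A (Python) =====
-- def makeStringsEqual(s: str, target: str) -> bool:
--     n=len(s)
--     ones=0
--     zto=0
--     otz=0
--     for i in range (n):
--         if(s[i]=='1'):
--             ones+=1
--         if(s[i]!=target[i]):
--             if(s[i]=='1'):
--                 otz+=1
--             else:
--                 zto+=1
--     if(zto>0):
--         if ones==0:
--             return False
--     ones+=zto
--     if(otz>0):
--         if ones<=otz: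
--             return False
--     return True
-- ===== SOURCE B (Python) =====
-- def makeStringsEqual(s: str, target: str) -> bool:
--     pairs = list(zip(s, target))
--     if any(a == '1' for a, _ in pairs):
--         return any(a == '1' and b == '1' for a, b in pairs) or any(a != '1' and a != b for a, b in pairs)
--     return not any(a != b for a, b in pairs)
-- ===== Notes on version B (the rewrite author's own statement) =====
-- stated objective: simpler
-- what changed: Replaces the three integer counters and the arithmetic threshold tests with a zip of the two strings and three boolean any() predicates (a '1' in s, a shared '1' position, a mismatch at a non-'1' position), returning directly from the boolean logic.
import Mathlib
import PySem

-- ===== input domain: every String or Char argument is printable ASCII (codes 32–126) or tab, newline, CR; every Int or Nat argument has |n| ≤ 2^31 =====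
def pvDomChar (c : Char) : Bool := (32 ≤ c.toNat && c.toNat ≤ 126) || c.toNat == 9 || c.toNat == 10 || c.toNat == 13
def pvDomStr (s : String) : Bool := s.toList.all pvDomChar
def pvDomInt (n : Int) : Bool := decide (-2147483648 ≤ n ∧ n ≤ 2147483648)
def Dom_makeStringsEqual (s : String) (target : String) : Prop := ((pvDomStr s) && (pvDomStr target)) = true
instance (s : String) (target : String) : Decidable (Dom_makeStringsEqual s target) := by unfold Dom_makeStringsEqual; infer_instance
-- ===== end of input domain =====

-- B replaces A's three integer counters and arithmetic threshold tests by a zip of the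
-- two strings and three boolean any-predicates combined with plain boolean logic (simpler).


-- ===== PORT A =====
-- A's loop body, per index, applied to the pair (s[i], target[i]); state = (ones, zto, otz)
def pvBodyA (acc : Int × Int × Int) (p : Char × Char) : Int × Int × Int :=
  let ones := if p.1 == '1' then acc.1 + 1 else acc.1
  let rest :=
    if p.1 != p.2 then
      (if p.1 == '1' then (acc.2.1, acc.2.2 + 1) else (acc.2.1 + 1, acc.2.2))
    else (acc.2.1, acc.2.2)
  (ones, rest)

def makeStringsEqual (s : String) (target : String) : Bool :=
  let n : Int := PySem.Str.len s
  -- for i in range(n): read s[i] and target[i] (both in range on Pre_; the ' ' default is never used there)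
  let res := (PySem.List.pyRange 0 n 1).foldl
    (fun acc i =>
      pvBodyA acc (PySem.List.pyGetD s.toList i ' ', PySem.List.pyGetD target.toList i ' '))
    (0, 0, 0)
  let ones := res.1
  let zto := res.2.1
  let otz := res.2.2
  if decide (zto > 0) && (ones == 0) then false
  else
    let ones := ones + zto
    if decide (otz > 0) && decide (ones ≤ otz) then false
    else true

-- ===== PORT B =====
def makeStringsEqual_alt (s : String) (target : String) : Bool :=
  let pairs := s.toList.zip target.toList
  if pairs.any (fun p => p.1 == '1') then
    pairs.any (fun p => p.1 == '1' && p.2 == '1') || pairs.any (fun p => p.1 != '1' && p.1 != p.2)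
  else
    !(pairs.any (fun p => p.1 != p.2))

-- ===== PRECONDITION & SPEC =====
-- Pre_ excludes exactly the inputs on which A raises IndexError (target shorter than s)
def Pre_makeStringsEqual (s : String) (target : String) : Prop :=
  s.toList.length ≤ target.toList.length
instance (s : String) (target : String) : Decidable (Pre_makeStringsEqual s target) := by
  unfold Pre_makeStringsEqual; infer_instance

def pvWitness_makeStringsEqual : String × String := ("10", "01")

def Spec_makeStringsEqual (s : String) (target : String) (out : Bool) : Prop := out = makeStringsEqual_alt s target
instance (s : String) (target : String) (out : Bool) : Decidable (Spec_makeStringsEqual s target out) := by unfold Spec_makeStringsEqual; infer_instance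

-- ===== CLAIM (what is proved, stated in full; the proofs are below) =====
def Claim_equal_makeStringsEqual : Prop := ∀ (s : String) (target : String), Dom_makeStringsEqual s target → Pre_makeStringsEqual s target → Spec_makeStringsEqual s target (makeStringsEqual s target)

-- ===== LEMMAS AND PROOFS =====

-- A's loop, run over the zipped pairs, computes the three counts
lemma pvCountsLoop (ps : List (Char × Char)) : ∀ (a z o : Int),
    ps.foldl pvBodyA (a, z, o) =
      (a + (ps.countP (fun p => p.1 == '1') : Int),
       z + (ps.countP (fun p => p.1 != p.2 && !(p.1 == '1')) : Int),
       o + (ps.countP (fun p => p.1 != p.2 && (p.1 == '1')) : Int)) := by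
  induction ps with
  | nil => intro a z o; simp
  | cons p ps ih =>
    intro a z o
    simp only [List.foldl_cons, List.countP_cons, pvBodyA]
    by_cases h1 : p.1 == '1' <;> by_cases h2 : p.1 != p.2 <;>
      simp only [h1, h2, if_true, if_false, Bool.false_eq_true, ih] <;>
      simp [Prod.ext_iff] <;> omega

-- every '1' of s either faces a '1' of target or mismatches it
lemma pvCountSplit (ps : List (Char × Char)) :
    ps.countP (fun p => p.1 != p.2 && (p.1 == '1')) +
      ps.countP (fun p => p.1 == '1' && p.2 == '1') =
      ps.countP (fun p => p.1 == '1') := by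
  induction ps with
  | nil => simp
  | cons p ps ih =>
    simp only [List.countP_cons]
    by_cases h1 : p.1 = '1'
    · by_cases h2 : p.2 = '1'
      · simp [h1, h2]; omega
      · have h2' : '1' ≠ p.2 := fun h => h2 h.symm
        simp [h1, h2, h2']; omega
    · have h1' : (p.1 == '1') = false := by simp [h1]
      simp [h1']; omega

-- mismatches split into mismatches at non-'1' and at '1' positions of s
lemma pvCountMismatch (ps : List (Char × Char)) :
    ps.countP (fun p => p.1 != p.2) =
      ps.countP (fun p => p.1 != p.2 && !(p.1 == '1')) +
        ps.countP (fun p => p.1 != p.2 && (p.1 == '1')) := by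
  induction ps with
  | nil => simp
  | cons p ps ih =>
    simp only [List.countP_cons]
    by_cases h1 : p.1 == '1' <;> by_cases h2 : p.1 != p.2 <;> simp [h1, h2] <;> omega

-- B's mismatch-at-non-'1' predicate counts the same pairs as A's zto predicate
lemma pvCountBSide (ps : List (Char × Char)) :
    ps.countP (fun p => p.1 != '1' && p.1 != p.2) =
      ps.countP (fun p => p.1 != p.2 && !(p.1 == '1')) := by
  apply List.countP_congr
  intro p _
  by_cases h1 : p.1 = '1' <;> by_cases h2 : p.1 = p.2 <;> simp [h1, h2]

-- A's finishing arithmetic tests equal B's boolean formula, given the two count identities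
lemma pvFinalArith (a z o b m : Nat) (h1 : o + b = a) (h2 : m = z + o) :
    (if decide ((z:Int) > 0) && (((a:Nat):Int) == 0) then false
     else if decide ((o:Int) > 0) && decide ((a:Int) + (z:Int) ≤ (o:Int)) then false else true)
    = (if decide (0 < a) then decide (0 < b) || decide (0 < z) else !decide (0 < m)) := by
  simp only [Bool.and_eq_true, decide_eq_true_eq, beq_iff_eq]
  split_ifs with hA hB hC <;>
    simp only [Bool.true_eq, Bool.false_eq, Bool.or_eq_true, Bool.or_eq_false_iff,
      Bool.not_eq_true', Bool.not_eq_false', decide_eq_true_eq, decide_eq_false_iff_not] <;>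
    push_cast at * <;> omega

lemma pvAnyCount {α : Type} (l : List α) (q : α → Bool) : l.any q = decide (0 < l.countP q) := by
  rcases h : l.any q with _ | _
  · simp only [List.any_eq_false] at h
    have h0 : l.countP q = 0 := List.countP_eq_zero.mpr h
    simp [h0]
  · simp only [List.any_eq_true] at h
    have h0 : 0 < l.countP q := List.countP_pos_iff.mpr (by tauto)
    simp [h0]

-- bridge: A's indexed loop over range(len(s)) equals the same loop over the zipped lists
lemma pvLoopZip (s target : String) (h : s.toList.length ≤ target.toList.length) :
    (PySem.List.pyRange 0 (PySem.Str.len s) 1).foldl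
      (fun acc i =>
        pvBodyA acc (PySem.List.pyGetD s.toList i ' ', PySem.List.pyGetD target.toList i ' '))
      ((0:Int), (0:Int), (0:Int)) =
    (s.toList.zip target.toList).foldl pvBodyA ((0:Int), (0:Int), (0:Int)) := by
  have hlen : (PySem.Str.len s) = PySem.List.len (s.toList.zip target.toList) := by
    rw [PySem.Str.len_eq, PySem.List.len_eq]
    simp only [List.length_zip]
    omega
  rw [hlen]
  rw [PySem.List.foldl_congr_mem _ _
    (fun acc j => pvBodyA acc (PySem.List.pyGetD (s.toList.zip target.toList) j (' ', ' '))) _ ?_]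
  · exact PySem.List.foldl_pyRange_zero_pyGetD (s.toList.zip target.toList) (' ', ' ') pvBodyA _
  · intro acc j hj
    rw [PySem.List.mem_pyRange_one] at hj
    obtain ⟨hj0, hj1⟩ := hj
    rw [PySem.List.len_eq] at hj1
    have hjz : j.toNat < (s.toList.zip target.toList).length := by omega
    have hs : j.toNat < s.toList.length := by rw [List.length_zip] at hjz; omega
    have ht : j.toNat < target.toList.length := by rw [List.length_zip] at hjz; omega
    simp only []
    rw [PySem.List.pyGetD_of_nonneg _ _ hj0, PySem.List.pyGetD_of_nonneg _ _ hj0,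
        PySem.List.pyGetD_of_nonneg _ _ hj0]
    congr 1
    rw [List.getD_eq_getElem _ _ hjz, List.getD_eq_getElem _ _ hs, List.getD_eq_getElem _ _ ht]
    simp [List.getElem_zip]

-- ===== VERDICT (by name: the statement is the Claim_ definition above) =====
theorem makeStringsEqual_spec : Claim_equal_makeStringsEqual := by
  intro s target _ hpre
  unfold Spec_makeStringsEqual
  simp only [makeStringsEqual, makeStringsEqual_alt]
  rw [pvLoopZip s target hpre, pvCountsLoop]
  simp only [zero_add]
  rw [pvAnyCount, pvAnyCount, pvAnyCount, pvAnyCount, pvCountBSide]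
  exact pvFinalArith _ _ _ _ _ (pvCountSplit _) (pvCountMismatch _)
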